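-- pv_equiv track=rewrite | github.com/ChengyuanXue/DALK_enhance | KG4LLM/Version/MyVersion2_6 copy 3 优化层次图谱.py | _find_paths_at_hop
-- ===== SOURCE A (Python) =====
-- def _find_paths_at_hop(graph, start_entity, target_hop):
--     """查找指定跳数的路径"""
--     def dfs_path_search(current_entity, current_hop, path, visited):
--         if current_hop == target_hop:
--             return [path]
--
--         if current_entity not in graph or current_entity in visited:
--             return []
--
--         visited.add(current_entity)
--         paths = []
--
--         for edge in graph[current_entity]:
--             new_path = path + [(current_entity, edge['relation'], edge['target'])]
--             paths.extend(
--                 dfs_path_search(edge['target'], current_hop + 1, new_path, visited.copy())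
--             )
--
--         return paths
--
--     return dfs_path_search(start_entity, 0, [], set())
-- ===== SOURCE B (Python) =====
-- def _find_paths_at_hop(graph, start_entity, target_hop):
--     """Iterative frontier expansion: run exactly target_hop rounds of edge expansion
--     (stopping early once the frontier is empty, which cannot change the result)."""
--     if target_hop < 0:
--         return []
--     frontier = [(start_entity, set(), [])]
--     for _ in range(target_hop):
--         if not frontier:
--             break
--         nxt = []
--         for ent, visited, path in frontier:
--             if ent not in graph or ent in visited:
--                 continue
--             vis2 = visited | {ent}
--             for edge in graph[ent]:
--                 nxt.append((edge['target'], vis2,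
--                             path + [(ent, edge['relation'], edge['target'])]))
--         frontier = nxt
--     return [p for (_, _, p) in frontier]
-- ===== Notes on version B (the rewrite author's own statement) =====
-- stated objective: alternative
-- what changed: Replaces the recursive depth-first search with an iterative breadth-first frontier expansion: a list of (entity, visited, path) states is expanded for exactly target_hop rounds (breaking early once the frontier is empty) and the surviving paths are returned.
-- outside the precondition, e.g. on _find_paths_at_hop({'a': [], 'b': [{}]}, 'a', 1): A returns [], B returns []
import Mathlib
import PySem

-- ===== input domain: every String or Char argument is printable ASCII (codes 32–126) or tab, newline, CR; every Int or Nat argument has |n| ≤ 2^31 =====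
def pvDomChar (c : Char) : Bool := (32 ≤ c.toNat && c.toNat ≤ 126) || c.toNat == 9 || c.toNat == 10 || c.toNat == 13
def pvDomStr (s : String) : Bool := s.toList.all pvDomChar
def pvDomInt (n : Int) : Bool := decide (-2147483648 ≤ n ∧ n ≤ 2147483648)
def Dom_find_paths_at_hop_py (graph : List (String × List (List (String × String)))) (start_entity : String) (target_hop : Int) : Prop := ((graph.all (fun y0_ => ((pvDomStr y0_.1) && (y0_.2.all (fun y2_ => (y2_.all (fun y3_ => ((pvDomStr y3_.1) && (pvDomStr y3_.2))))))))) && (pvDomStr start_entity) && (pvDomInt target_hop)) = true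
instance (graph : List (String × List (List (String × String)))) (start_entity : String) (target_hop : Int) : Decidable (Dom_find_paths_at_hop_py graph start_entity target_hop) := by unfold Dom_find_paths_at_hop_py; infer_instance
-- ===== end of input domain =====

-- B replaces A's recursive depth-first search by an iterative round-by-round frontier
-- expansion (alternative decomposition, same return value; neither version mutates its arguments).

-- ===== PORT A =====
-- dfs_path_search; the added Nat argument is pure fuel for totality (graph.length + 1 + target_hop.toNat
-- always exceeds the recursion depth, so the fuel-exhausted branch is never taken on any input).
def pvDfsA (graph : List (String × List (List (String × String)))) (target_hop : Int) :
    Nat → String → Int → List (String × String × String) → PySem.Set String →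
    List (List (String × String × String))
  | 0, _, _, _, _ => []
  | fuel+1, current_entity, current_hop, path, visited =>
    if current_hop = target_hop then [path]
    else if !(PySem.Dict.mk graph).contains current_entity || PySem.Set.contains visited current_entity then []
    else
      let visited' := PySem.Set.add visited current_entity
      ((PySem.Dict.mk graph).getD current_entity []).foldl
        (fun paths edge =>
          paths ++ pvDfsA graph target_hop fuel
            ((PySem.Dict.mk edge).getD "target" "")
            (current_hop + 1)
            (path ++ [(current_entity, (PySem.Dict.mk edge).getD "relation" "", (PySem.Dict.mk edge).getD "target" "")])
            visited')
        []

def find_paths_at_hop_py (graph : List (String × List (List (String × String)))) (start_entity : String) (target_hop : Int) : List (List (String × String × String)) :=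
  pvDfsA graph target_hop (graph.length + 1 + target_hop.toNat) start_entity 0 [] PySem.Set.empty

-- ===== PORT B =====
-- one round of frontier expansion (the body of B's 'for _ in range(target_hop)' loop)
def pvStepB (graph : List (String × List (List (String × String))))
    (frontier : List (String × PySem.Set String × List (String × String × String))) :
    List (String × PySem.Set String × List (String × String × String)) :=
  frontier.foldl
    (fun nxt s =>
      if !(PySem.Dict.mk graph).contains s.1 || PySem.Set.contains s.2.1 s.1 then nxt
      else
        let vis2 := PySem.Set.union s.2.1 [s.1]
        ((PySem.Dict.mk graph).getD s.1 []).foldl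
          (fun nxt edge =>
            nxt ++ [(((PySem.Dict.mk edge).getD "target" ""), vis2,
              s.2.2 ++ [(s.1, (PySem.Dict.mk edge).getD "relation" "", (PySem.Dict.mk edge).getD "target" "")])])
          nxt)
    []

def pvRoundsB (graph : List (String × List (List (String × String)))) :
    Nat → List (String × PySem.Set String × List (String × String × String)) →
    List (String × PySem.Set String × List (String × String × String))
  | 0, frontier => frontier
  | n+1, frontier => if frontier.isEmpty then frontier else pvRoundsB graph n (pvStepB graph frontier)

def find_paths_at_hop_py_alt (graph : List (String × List (List (String × String)))) (start_entity : String) (target_hop : Int) : List (List (String × String × String)) :=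
  if target_hop < 0 then []
  else (pvRoundsB graph target_hop.toNat [(start_entity, PySem.Set.empty, [])]).map (fun s => s.2.2)

-- ===== PRECONDITION & SPEC =====
-- Pre_ excludes inputs on which the search may read an edge dict missing a 'relation'/'target' key
-- (Python A raises KeyError there); conservatively every graph containing an ill-keyed edge is
-- excluded unless the search trivially reads no edge (target_hop = 0, or start_entity not a key).
def Pre_find_paths_at_hop_py (graph : List (String × List (List (String × String)))) (start_entity : String) (target_hop : Int) : Prop :=
  target_hop = 0 ∨ ¬ start_entity ∈ graph.map Prod.fst ∨
    (∀ p ∈ graph, ∀ edge ∈ p.2,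
      (PySem.Dict.mk edge).contains "relation" = true ∧ (PySem.Dict.mk edge).contains "target" = true)
instance (graph : List (String × List (List (String × String)))) (start_entity : String) (target_hop : Int) : Decidable (Pre_find_paths_at_hop_py graph start_entity target_hop) := by unfold Pre_find_paths_at_hop_py; infer_instance

def pvWitness_find_paths_at_hop_py : (List (String × List (List (String × String)))) × String × Int :=
  ([("a", [[("relation", "r"), ("target", "b")]]), ("b", [])], "a", 2)

def Spec_find_paths_at_hop_py (graph : List (String × List (List (String × String)))) (start_entity : String) (target_hop : Int) (out : List (List (String × String × String))) : Prop := out = find_paths_at_hop_py_alt graph start_entity target_hop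
instance (graph : List (String × List (List (String × String)))) (start_entity : String) (target_hop : Int) (out : List (List (String × String × String))) : Decidable (Spec_find_paths_at_hop_py graph start_entity target_hop out) := by unfold Spec_find_paths_at_hop_py; infer_instance

-- ===== CLAIM (what is proved, stated in full; the proofs are below) =====
def Claim_equal_find_paths_at_hop_py : Prop := ∀ (graph : List (String × List (List (String × String)))) (start_entity : String) (target_hop : Int), Dom_find_paths_at_hop_py graph start_entity target_hop → Pre_find_paths_at_hop_py graph start_entity target_hop → Spec_find_paths_at_hop_py graph start_entity target_hop (find_paths_at_hop_py graph start_entity target_hop)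

-- ===== LEMMAS AND PROOFS =====

theorem pvWitness_ok :
    Dom_find_paths_at_hop_py (pvWitness_find_paths_at_hop_py.1) (pvWitness_find_paths_at_hop_py.2.1) (pvWitness_find_paths_at_hop_py.2.2) ∧
    Pre_find_paths_at_hop_py (pvWitness_find_paths_at_hop_py.1) (pvWitness_find_paths_at_hop_py.2.1) (pvWitness_find_paths_at_hop_py.2.2) := by
  decide

-- A returns [] whenever the current hop already exceeds target_hop (in particular for negative target_hop)
theorem pvDfsA_of_lt (graph : List (String × List (List (String × String)))) (target_hop : Int) :
    ∀ (fuel : Nat) (cur : String) (hop : Int) (path : List (String × String × String)) (vis : PySem.Set String),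
    target_hop < hop → pvDfsA graph target_hop fuel cur hop path vis = [] := by
  intro fuel
  induction fuel with
  | zero => intro cur hop path vis _; rfl
  | succ f ih =>
    intro cur hop path vis hlt
    rw [pvDfsA, if_neg (by omega)]
    by_cases hc : (!(PySem.Dict.mk graph).contains cur || PySem.Set.contains vis cur) = true
    · rw [if_pos hc]
    · rw [if_neg hc]
      rw [PySem.List.foldl_append_eq_flatMap]
      simp only [List.nil_append, List.flatMap_eq_nil_iff]
      intro e _
      exact ih _ _ _ _ (by omega)

theorem pvFoldAux (graph : List (String × List (List (String × String)))) :
    ∀ (frontier : List (String × PySem.Set String × List (String × String × String)))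
      (init : List (String × PySem.Set String × List (String × String × String))),
    frontier.foldl
      (fun nxt s =>
        if !(PySem.Dict.mk graph).contains s.1 || PySem.Set.contains s.2.1 s.1 then nxt
        else
          ((PySem.Dict.mk graph).getD s.1 []).foldl
            (fun nxt edge =>
              nxt ++ [(((PySem.Dict.mk edge).getD "target" ""), PySem.Set.union s.2.1 [s.1],
                s.2.2 ++ [(s.1, (PySem.Dict.mk edge).getD "relation" "", (PySem.Dict.mk edge).getD "target" "")])])
            nxt) init =
    init ++ frontier.flatMap (fun s =>
      if !(PySem.Dict.mk graph).contains s.1 || PySem.Set.contains s.2.1 s.1 then []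
      else ((PySem.Dict.mk graph).getD s.1 []).map (fun edge =>
        (((PySem.Dict.mk edge).getD "target" ""), PySem.Set.union s.2.1 [s.1],
          s.2.2 ++ [(s.1, (PySem.Dict.mk edge).getD "relation" "", (PySem.Dict.mk edge).getD "target" "")]))) := by
  intro frontier
  induction frontier with
  | nil => intro init; simp
  | cons s rest ih =>
    intro init
    rw [List.foldl_cons, ih, List.flatMap_cons, ← List.append_assoc]
    congr 1
    by_cases hc : (!(PySem.Dict.mk graph).contains s.1 || PySem.Set.contains s.2.1 s.1) = true
    · rw [if_pos hc, if_pos hc, List.append_nil]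
    · rw [if_neg hc, if_neg hc, PySem.List.foldl_append_eq_flatMap]
      exact congrArg (init ++ ·) (List.map_eq_flatMap).symm

-- pvStepB as a flatMap of per-state expansions
theorem pvStepB_eq_flatMap (graph : List (String × List (List (String × String))))
    (frontier : List (String × PySem.Set String × List (String × String × String))) :
    pvStepB graph frontier = frontier.flatMap (fun s =>
      if !(PySem.Dict.mk graph).contains s.1 || PySem.Set.contains s.2.1 s.1 then []
      else ((PySem.Dict.mk graph).getD s.1 []).map (fun edge =>
        (((PySem.Dict.mk edge).getD "target" ""), PySem.Set.union s.2.1 [s.1],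
          s.2.2 ++ [(s.1, (PySem.Dict.mk edge).getD "relation" "", (PySem.Dict.mk edge).getD "target" "")]))) := by
  have h := pvFoldAux graph frontier []
  rw [List.nil_append] at h
  exact h

theorem pvStepB_append (graph : List (String × List (List (String × String))))
    (a b : List (String × PySem.Set String × List (String × String × String))) :
    pvStepB graph (a ++ b) = pvStepB graph a ++ pvStepB graph b := by
  simp [pvStepB_eq_flatMap]

theorem pvRoundsB_nil (graph : List (String × List (List (String × String)))) :
    ∀ k : Nat, pvRoundsB graph k [] = [] := by
  intro k
  cases k <;> rfl

-- the early break on an empty frontier is invisible: one round is always one pvStepB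
theorem pvRoundsB_succ (graph : List (String × List (List (String × String))))
    (n : Nat) (f : List (String × PySem.Set String × List (String × String × String))) :
    pvRoundsB graph (n+1) f = pvRoundsB graph n (pvStepB graph f) := by
  cases f with
  | nil => rw [show pvStepB graph [] = [] from rfl, pvRoundsB_nil, pvRoundsB_nil]
  | cons x t => rfl

theorem pvRoundsB_append (graph : List (String × List (List (String × String)))) :
    ∀ (k : Nat) (a b : List (String × PySem.Set String × List (String × String × String))),
    pvRoundsB graph k (a ++ b) = pvRoundsB graph k a ++ pvRoundsB graph k b := by
  intro k
  induction k with
  | zero => intro a b; rfl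
  | succ n ih =>
    intro a b
    rw [pvRoundsB_succ, pvStepB_append, ih, pvRoundsB_succ, pvRoundsB_succ]

theorem pvRoundsB_flatMap (graph : List (String × List (List (String × String)))) (k : Nat)
    {α : Type} (l : List α)
    (c : α → (String × PySem.Set String × List (String × String × String))) :
    pvRoundsB graph k (l.map c) = l.flatMap (fun e => pvRoundsB graph k [c e]) := by
  induction l with
  | nil => simp [pvRoundsB_nil]
  | cons x t ih =>
    rw [List.map_cons, show c x :: t.map c = [c x] ++ t.map c from rfl,
      pvRoundsB_append, ih, List.flatMap_cons]

-- the heart of the equivalence: a DFS call with k hops remaining computes exactly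
-- what k rounds of frontier expansion of its single state compute
theorem pvDfsA_eq_rounds (graph : List (String × List (List (String × String)))) (target_hop : Int) :
    ∀ (k : Nat) (fuel : Nat) (cur : String) (hop : Int) (path : List (String × String × String)) (vis : PySem.Set String),
    hop + k = target_hop → k + 1 ≤ fuel →
    pvDfsA graph target_hop fuel cur hop path vis =
      (pvRoundsB graph k [(cur, vis, path)]).map (fun s => s.2.2) := by
  intro k
  induction k with
  | zero =>
    intro fuel cur hop path vis hk hf
    match fuel, hf with
    | f+1, _ =>
      rw [pvDfsA, if_pos (by omega)]
      rfl
  | succ n ih =>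
    intro fuel cur hop path vis hk hf
    match fuel, hf with
    | f+1, hf =>
      rw [pvDfsA, if_neg (by push_cast at hk ⊢; omega)]
      rw [pvRoundsB_succ]
      rw [pvStepB_eq_flatMap]
      simp only [List.flatMap_cons, List.flatMap_nil, List.append_nil]
      by_cases hc : (!(PySem.Dict.mk graph).contains cur || PySem.Set.contains vis cur) = true
      · rw [if_pos hc, if_pos hc, pvRoundsB_nil]
        rfl
      · rw [if_neg hc, if_neg hc]
        rw [PySem.List.foldl_append_eq_flatMap, List.nil_append]
        rw [pvRoundsB_flatMap, List.map_flatMap]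
        apply List.flatMap_congr
        intro edge _
        have hvis : PySem.Set.union vis [cur] = PySem.Set.add vis cur := rfl
        rw [hvis]
        exact ih f _ _ _ _ (by push_cast at hk ⊢; omega) (by omega)

-- ===== VERDICT (by name: the statement is the Claim_ definition above) =====
theorem find_paths_at_hop_py_spec : Claim_equal_find_paths_at_hop_py := by
  intro graph start_entity target_hop _ _
  unfold Spec_find_paths_at_hop_py find_paths_at_hop_py find_paths_at_hop_py_alt
  by_cases hneg : target_hop < 0
  · rw [if_pos hneg]
    exact pvDfsA_of_lt graph target_hop _ _ _ _ _ (by omega)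
  · rw [if_neg hneg]
    exact pvDfsA_eq_rounds graph target_hop target_hop.toNat _ _ _ _ _
      (by omega) (by omega)
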